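-- pv_equiv track=rewrite | github.com/ThisIsDNa/Resume_Refining_and_Tailoring | backend/app/services/output_builder.py | _sounds_debuggy
-- ===== SOURCE A (Python) =====
-- def _sounds_debuggy(notes: str) -> bool:
--     n = (notes or "").lower()
--     return any(
--         x in n
--         for x in (
--             "score_breakdown",
--             "classification",
--             "req_",
--             "evidence_id",
--             "mapper",
--             "keyword_overlap",
--             "validated against",
--             "llm output",
--             "deterministic edit",
--             "summary rewrite rejected",
--         )
--     )
-- ===== SOURCE B (Python) =====
-- _DEBUG_PATTERNS = (
--     "score_breakdown",
--     "classification",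
--     "req_",
--     "evidence_id",
--     "mapper",
--     "keyword_overlap",
--     "validated against",
--     "llm output",
--     "deterministic edit",
--     "summary rewrite rejected",
-- )
--
--
-- def _sounds_debuggy(notes: str) -> bool:
--     # single left-to-right pass: at each position test whether any pattern starts there
--     n = (notes or "").lower()
--     for i in range(len(n) + 1):
--         for p in _DEBUG_PATTERNS:
--             if n.startswith(p, i):
--                 return True
--     return False
-- ===== Notes on version B (the rewrite author's own statement) =====
-- stated objective: alternative
-- what changed: A makes ten independent pattern-major substring scans ('x in n' per pattern); B makes one position-major left-to-right pass over the lowered notes, testing at each position whether any of the fixed patterns starts there (n.startswith(p, i)) — the pattern tuple itself is necessarily the same data.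
import Mathlib
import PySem

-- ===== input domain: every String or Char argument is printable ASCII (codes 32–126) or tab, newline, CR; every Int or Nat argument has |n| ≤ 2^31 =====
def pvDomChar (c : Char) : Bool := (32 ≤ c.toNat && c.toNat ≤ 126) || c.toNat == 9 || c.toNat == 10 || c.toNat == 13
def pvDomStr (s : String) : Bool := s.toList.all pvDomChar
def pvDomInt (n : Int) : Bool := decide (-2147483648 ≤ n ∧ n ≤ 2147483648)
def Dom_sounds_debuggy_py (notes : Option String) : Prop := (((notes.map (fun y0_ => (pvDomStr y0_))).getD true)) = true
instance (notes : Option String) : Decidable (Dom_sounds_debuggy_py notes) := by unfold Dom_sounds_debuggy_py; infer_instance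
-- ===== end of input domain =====

-- B replaces A's ten independent substring scans with one left-to-right pass that tests
-- every pattern at each position (objective: alternative traversal, same result).

-- ===== PORT A =====
-- A's fixed pattern tuple
def aPatterns : List String :=
  ["score_breakdown", "classification", "req_", "evidence_id", "mapper",
   "keyword_overlap", "validated against", "llm output", "deterministic edit",
   "summary rewrite rejected"]

def sounds_debuggy_py (notes : Option String) : Bool :=
  let n := PySem.Str.lower (notes.getD "")
  aPatterns.any (fun x => PySem.Str.isIn x n)

-- ===== PORT B =====
-- B's fixed pattern tuple, as char lists (the lowered notes is scanned position by position)
def bPatterns : List (List Char) :=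
  (["score_breakdown", "classification", "req_", "evidence_id", "mapper",
    "keyword_overlap", "validated against", "llm output", "deterministic edit",
    "summary rewrite rejected"] : List String).map String.toList

-- the 'for i in range(len(n)+1)' loop of Source B: recursion over the suffixes of n,
-- testing 'n.startswith(p, i)' (= p is a prefix of the current suffix) for every pattern
def bScan (cs : List Char) : Bool :=
  if bPatterns.any (fun p => PySem.Chars.startswith cs p) then true
  else
    match cs with
    | [] => false
    | _ :: t => bScan t

def sounds_debuggy_py_alt (notes : Option String) : Bool :=
  let n := PySem.Str.lower (notes.getD "")
  bScan n.toList

-- ===== PRECONDITION & SPEC =====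
def Spec_sounds_debuggy_py (notes : Option String) (out : Bool) : Prop := out = sounds_debuggy_py_alt notes
instance (notes : Option String) (out : Bool) : Decidable (Spec_sounds_debuggy_py notes out) := by unfold Spec_sounds_debuggy_py; infer_instance

-- ===== CLAIM (what is proved, stated in full; the proofs are below) =====
def Claim_equal_sounds_debuggy_py : Prop := ∀ (notes : Option String), Dom_sounds_debuggy_py notes → Spec_sounds_debuggy_py notes (sounds_debuggy_py notes)

-- ===== LEMMAS AND PROOFS =====

-- bScan finds a pattern iff some pattern is a prefix of some suffix
theorem bScan_iff (cs : List Char) :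
    bScan cs = true ↔ ∃ p ∈ bPatterns, ∃ j, p <+: cs.drop j := by
  induction cs with
  | nil =>
    simp [bScan, List.any_eq_true, PySem.Chars.startswith_iff]
  | cons c t ih =>
    rw [bScan]
    split_ifs with h
    · simp only [true_iff]
      rcases List.any_eq_true.mp h with ⟨p, hp, hpre⟩
      exact ⟨p, hp, 0, by simpa using (PySem.Chars.startswith_iff _ _).mp hpre⟩
    · simp only [ih]
      constructor
      · rintro ⟨p, hp, j, hj⟩
        exact ⟨p, hp, j + 1, by simpa using hj⟩
      · rintro ⟨p, hp, j, hj⟩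
        cases j with
        | zero =>
          exact absurd (List.any_eq_true.mpr ⟨p, hp, ((PySem.Chars.startswith_iff _ _).mpr (by simpa using hj))⟩) h
        | succ j => exact ⟨p, hp, j, by simpa using hj⟩

theorem sounds_debuggy_py_spec : Claim_equal_sounds_debuggy_py := by
  intro notes _
  unfold Spec_sounds_debuggy_py sounds_debuggy_py sounds_debuggy_py_alt
  apply Bool.eq_iff_iff.mpr
  rw [List.any_eq_true, bScan_iff]
  constructor
  · rintro ⟨x, hx, hin⟩
    refine ⟨x.toList, ?_, ?_⟩
    · revert hx; simp [aPatterns, bPatterns]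
      rintro (rfl|rfl|rfl|rfl|rfl|rfl|rfl|rfl|rfl|rfl) <;> simp
    · exact (PySem.Chars.exists_prefix_drop_iff_isIn _ _).mpr
        (by simpa using (PySem.Chars.isIn_iff_infix _ _).mpr (by simpa using (PySem.Str.isIn_iff_infix _ _).mp hin))
  · rintro ⟨p, hp, hdrop⟩
    have hin := (PySem.Chars.exists_prefix_drop_iff_isIn _ _).mp hdrop
    revert hp; simp only [bPatterns, List.mem_map, List.mem_cons, List.not_mem_nil, or_false]
    rintro ⟨x, hx, rfl⟩
    refine ⟨x, by simpa [aPatterns] using hx, ?_⟩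
    exact (PySem.Str.isIn_iff_infix _ _).mpr (by simpa using (PySem.Chars.isIn_iff_infix _ _).mp hin)
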